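-- pv_equiv track=rewrite | github.com/Ashishkumar448/GFG-Problem-of-the-day | 2026-03-March-GFG-POTD/March 09 - Largest number in one swap/Solution.py | largestSwap
-- ===== SOURCE A (Python) =====
-- def largestSwap(s: str) -> str:
--     arr = list(s)
--     n = len(arr)
--
--     maxIdx = [0] * n
--     maxIdx[n - 1] = n - 1
--
--     for i in range(n - 2, -1, -1):
--         if arr[i] > arr[maxIdx[i + 1]]:
--             maxIdx[i] = i
--         else:
--             maxIdx[i] = maxIdx[i + 1]
--
--     for i in range(n):
--         if arr[i] < arr[maxIdx[i]]:
--             arr[i], arr[maxIdx[i]] = arr[maxIdx[i]], arr[i]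
--             break
--
--     return "".join(arr)
-- ===== SOURCE B (Python) =====
-- def largestSwap(s: str) -> str:
--     if not s:
--         return s
--     arr = list(s)
--     n = len(arr)
--     maxD, maxPos = arr[n - 1], n - 1
--     bestI = bestJ = -1
--     for i in range(n - 2, -1, -1):
--         if arr[i] > maxD:
--             maxD, maxPos = arr[i], i
--         elif arr[i] < maxD:
--             bestI, bestJ = i, maxPos
--     if bestI == -1:
--         return s
--     arr[bestI], arr[bestJ] = arr[bestJ], arr[bestI]
--     return "".join(arr)
-- ===== Notes on version B (the rewrite author's own statement) =====
-- stated objective: simpler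
-- what changed: Replaced the O(n) suffix-argmax index array plus a second left-to-right scan with a single right-to-left pass that keeps only a running maximum (value, position) and the current best swap pair; B also returns the empty string unchanged where A raises IndexError (outside Pre_).
import Mathlib
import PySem

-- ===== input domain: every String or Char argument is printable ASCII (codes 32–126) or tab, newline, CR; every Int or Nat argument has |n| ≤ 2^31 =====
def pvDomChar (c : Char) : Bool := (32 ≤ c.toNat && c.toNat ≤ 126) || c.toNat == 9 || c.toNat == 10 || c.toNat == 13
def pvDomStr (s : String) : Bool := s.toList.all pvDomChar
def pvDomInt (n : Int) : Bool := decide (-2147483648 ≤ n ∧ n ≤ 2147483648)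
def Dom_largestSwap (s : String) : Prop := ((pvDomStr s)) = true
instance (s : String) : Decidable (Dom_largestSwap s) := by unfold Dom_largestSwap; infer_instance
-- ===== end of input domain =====

-- B replaces A's suffix-argmax index array plus second scan with one right-to-left pass
-- keeping a running maximum (value, position) and the best swap pair (objective: simpler).

-- ===== PORT A =====
-- second loop of A: 'for i in range(n): if arr[i] < arr[maxIdx[i]]: swap; break'
def largestSwapLoop2 (arr : List Char) (mi : List Int) : List Int → List Char
  | [] => arr
  | i :: rest =>
    let j := PySem.List.pyGetD mi i 0
    if PySem.List.pyGetD arr i ' ' < PySem.List.pyGetD arr j ' ' then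
      PySem.List.pySetD (PySem.List.pySetD arr i (PySem.List.pyGetD arr j ' ')) j
        (PySem.List.pyGetD arr i ' ')
    else largestSwapLoop2 arr mi rest

def largestSwap (s : String) : String :=
  let arr := s.toList
  let n : Int := arr.length
  -- maxIdx = [0]*n; maxIdx[n-1] = n-1  (IndexError on the empty string: excluded by Pre_)
  let mi0 : List Int := PySem.List.pySetD (List.replicate n.toNat 0) (n - 1) (n - 1)
  let mi := (PySem.List.pyRange (n - 2) (-1) (-1)).foldl
    (fun mi i =>
      if PySem.List.pyGetD arr i ' ' >
          PySem.List.pyGetD arr (PySem.List.pyGetD mi (i + 1) 0) ' ' then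
        PySem.List.pySetD mi i i
      else
        PySem.List.pySetD mi i (PySem.List.pyGetD mi (i + 1) 0)) mi0
  String.ofList (largestSwapLoop2 arr mi (PySem.List.pyRange 0 n 1))

-- ===== PORT B =====
def largestSwap_alt (s : String) : String :=
  if s.toList = [] then s
  else
    let arr := s.toList
    let n : Int := arr.length
    let st := (PySem.List.pyRange (n - 2) (-1) (-1)).foldl
      (fun (st : Char × Int × Int × Int) i =>
        match st with
        | (maxD, maxPos, bestI, bestJ) =>
          let c := PySem.List.pyGetD arr i ' '
          if c > maxD then (c, i, bestI, bestJ)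
          else if c < maxD then (maxD, maxPos, i, maxPos)
          else (maxD, maxPos, bestI, bestJ))
      (PySem.List.pyGetD arr (n - 1) ' ', n - 1, -1, -1)
    match st with
    | (_, _, bestI, bestJ) =>
      if bestI = -1 then s
      else
        String.ofList (PySem.List.pySetD
          (PySem.List.pySetD arr bestI (PySem.List.pyGetD arr bestJ ' ')) bestJ
          (PySem.List.pyGetD arr bestI ' '))

-- ===== PRECONDITION & SPEC =====
-- A raises IndexError on the empty string (maxIdx[-1] on an empty list); Pre_ excludes exactly that input.
def Pre_largestSwap (s : String) : Prop := s.toList ≠ []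
instance (s : String) : Decidable (Pre_largestSwap s) := by unfold Pre_largestSwap; infer_instance
def pvWitness_largestSwap : String := "132"

def Spec_largestSwap (s : String) (out : String) : Prop := out = largestSwap_alt s
instance (s : String) (out : String) : Decidable (Spec_largestSwap s out) := by unfold Spec_largestSwap; infer_instance

-- ===== CLAIM (what is proved, stated in full; the proofs are below) =====
def Claim_equal_largestSwap : Prop := ∀ (s : String), Dom_largestSwap s → Pre_largestSwap s → Spec_largestSwap s (largestSwap s)

-- ===== LEMMAS AND PROOFS =====

-- index of the RIGHTMOST maximal character (ties go to the later index, as in A's first loop)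
def rmaxIdx : List Char → Nat
  | [] => 0
  | [_] => 0
  | a :: b :: t => if a > (b :: t).getD (rmaxIdx (b :: t)) ' ' then 0 else rmaxIdx (b :: t) + 1

-- leftmost index i with l[i] < max(l[i:]), paired with the rightmost argmax of l[i:]
def pairAux : List Char → Option (Nat × Nat)
  | [] => none
  | [_] => none
  | a :: b :: t =>
    if a < (b :: t).getD (rmaxIdx (b :: t)) ' ' then some (0, rmaxIdx (b :: t) + 1)
    else (pairAux (b :: t)).map (fun p => (p.1 + 1, p.2 + 1))

def mval (l : List Char) : Char := l.getD (rmaxIdx l) ' '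

def swapD (arr : List Char) (i j : Nat) : List Char :=
  (arr.set i (arr.getD j ' ')).set j (arr.getD i ' ')

def specRes (l : List Char) (k : Nat) : List Char :=
  match pairAux (l.drop k) with
  | none => l
  | some (i, j) => swapD l (k + i) (k + j)

def stepA (arr : List Char) (mi : List Int) (i : Int) : List Int :=
  if PySem.List.pyGetD arr i ' ' >
      PySem.List.pyGetD arr (PySem.List.pyGetD mi (i + 1) 0) ' ' then
    PySem.List.pySetD mi i i
  else
    PySem.List.pySetD mi i (PySem.List.pyGetD mi (i + 1) 0)

def miBuilt (l : List Char) : List Int :=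
  (PySem.List.pyRange ((l.length : Int) - 2) (-1) (-1)).foldl (stepA l)
    (PySem.List.pySetD (List.replicate ((l.length : Int)).toNat 0)
      ((l.length : Int) - 1) ((l.length : Int) - 1))

def stepB (arr : List Char) (st : Char × Int × Int × Int) (i : Int) : Char × Int × Int × Int :=
  match st with
  | (maxD, maxPos, bestI, bestJ) =>
    let c := PySem.List.pyGetD arr i ' '
    if c > maxD then (c, i, bestI, bestJ)
    else if c < maxD then (maxD, maxPos, i, maxPos)
    else (maxD, maxPos, bestI, bestJ)

def encI (k : Nat) : Option (Nat × Nat) → Int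
  | none => -1
  | some p => (k : Int) + p.1

def encJ (k : Nat) : Option (Nat × Nat) → Int
  | none => -1
  | some p => (k : Int) + p.2

def stateOf (l : List Char) (k : Nat) : Char × Int × Int × Int :=
  (mval (l.drop k), (k : Int) + rmaxIdx (l.drop k),
   encI k (pairAux (l.drop k)), encJ k (pairAux (l.drop k)))

lemma rmaxIdx_cons (a : Char) (t : List Char) (ht : t ≠ []) :
    rmaxIdx (a :: t) = if a > t.getD (rmaxIdx t) ' ' then 0 else rmaxIdx t + 1 := by
  cases t with
  | nil => exact absurd rfl ht
  | cons b t => rfl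

lemma pairAux_cons (a : Char) (t : List Char) (ht : t ≠ []) :
    pairAux (a :: t) =
      if a < t.getD (rmaxIdx t) ' ' then some (0, rmaxIdx t + 1)
      else (pairAux t).map (fun p => (p.1 + 1, p.2 + 1)) := by
  cases t with
  | nil => exact absurd rfl ht
  | cons b t => rfl

lemma getD_drop (l : List Char) (i j : Nat) (d : Char) :
    (l.drop i).getD j d = l.getD (i + j) d := by
  simp [List.getD, List.getElem?_drop]

lemma rmaxIdx_len_one (l : List Char) (h : l.length = 1) : rmaxIdx l = 0 := by
  cases l with
  | nil => rfl
  | cons a t =>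
    cases t with
    | nil => rfl
    | cons b u => simp at h

lemma pairAux_len_one (l : List Char) (h : l.length = 1) : pairAux l = none := by
  cases l with
  | nil => rfl
  | cons a t =>
    cases t with
    | nil => rfl
    | cons b u => simp at h

lemma mval_cons (a : Char) (t : List Char) (ht : t ≠ []) :
    mval (a :: t) = if a > mval t then a else mval t := by
  unfold mval
  rw [rmaxIdx_cons a t ht]
  split_ifs with h
  · rfl
  · simp

lemma getD_set_self (mi : List Int) (i : Nat) (v : Int) (h : i < mi.length) :
    (mi.set i v).getD i 0 = v := by
  simp [List.getD, h]

lemma getD_set_ne (mi : List Int) (i k : Nat) (v : Int) (h : i ≠ k) :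
    (mi.set i v).getD k 0 = mi.getD k 0 := by
  simp [List.getD, h]

lemma encI_shift (k : Nat) (p : Option (Nat × Nat)) :
    encI k (p.map (fun q => (q.1 + 1, q.2 + 1))) = encI (k + 1) p := by
  cases p with
  | none => rfl
  | some q => simp [encI]; ring

lemma encJ_shift (k : Nat) (p : Option (Nat × Nat)) :
    encJ k (p.map (fun q => (q.1 + 1, q.2 + 1))) = encJ (k + 1) p := by
  cases p with
  | none => rfl
  | some q => simp [encJ]; ring

lemma drop_ne_nil (l : List Char) (k : Nat) (h : k < l.length) : l.drop k ≠ [] := by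
  simp [List.drop_eq_nil_iff]; omega

lemma stepA_spec (l : List Char) (mi : List Int) (m : Nat) (hm : m + 2 ≤ l.length)
    (hval : mi.getD (m + 1) 0 = ((m + 1 : Nat) : Int) + rmaxIdx (l.drop (m + 1))) :
    stepA l mi (m : Int) = mi.set m ((m : Int) + rmaxIdx (l.drop m)) := by
  have hm0 : m < l.length := by omega
  have ht : l.drop (m + 1) ≠ [] := drop_ne_nil l (m + 1) (by omega)
  have hdm : l.drop m = l[m] :: l.drop (m + 1) := List.drop_eq_getElem_cons hm0
  have e1 : PySem.List.pyGetD l (m : Int) ' ' = l[m] := by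
    rw [PySem.List.pyGetD_natCast]; exact List.getD_eq_getElem l ' ' hm0
  have e2 : ((m : Int) + 1) = ((m + 1 : Nat) : Int) := by push_cast; ring
  have e3 : PySem.List.pyGetD mi ((m : Int) + 1) 0 =
      ((m + 1 + rmaxIdx (l.drop (m + 1)) : Nat) : Int) := by
    rw [e2, PySem.List.pyGetD_natCast, hval]; push_cast; ring
  have e4 : PySem.List.pyGetD l ((m + 1 + rmaxIdx (l.drop (m + 1)) : Nat) : Int) ' ' =
      (l.drop (m + 1)).getD (rmaxIdx (l.drop (m + 1))) ' ' := by
    rw [PySem.List.pyGetD_natCast, getD_drop]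
  have e5 : rmaxIdx (l.drop m) =
      if l[m] > (l.drop (m + 1)).getD (rmaxIdx (l.drop (m + 1))) ' ' then 0
      else rmaxIdx (l.drop (m + 1)) + 1 := by
    rw [hdm, rmaxIdx_cons _ _ ht]
  unfold stepA
  rw [e1, e3, e4, e5]
  split_ifs with hc
  · rw [PySem.List.pySetD_natCast]
    simp
  · rw [PySem.List.pySetD_natCast]
    congr 1
    push_cast; ring

lemma foldA_spec (l : List Char) : ∀ (m : Nat) (mi : List Int), m + 2 ≤ l.length →
    mi.length = l.length →
    (∀ k : Nat, m < k → k < l.length → mi.getD k 0 = (k : Int) + rmaxIdx (l.drop k)) →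
    ((PySem.List.pyRange (m : Int) (-1) (-1)).foldl (stepA l) mi).length = l.length ∧
    ∀ k : Nat, k < l.length →
      ((PySem.List.pyRange (m : Int) (-1) (-1)).foldl (stepA l) mi).getD k 0 =
        (k : Int) + rmaxIdx (l.drop k) := by
  intro m
  induction m with
  | zero =>
    intro mi hm hlen hval
    have h1 : PySem.List.pyRange ((0 : Nat) : Int) (-1) (-1) =
        ((0 : Nat) : Int) :: PySem.List.pyRange (((0 : Nat) : Int) - 1) (-1) (-1) :=
      PySem.List.pyRange_neg_one_cons (by norm_num)
    have h2 : PySem.List.pyRange (((0 : Nat) : Int) - 1) (-1) (-1) = [] :=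
      PySem.List.pyRange_neg_one_eq_nil (by norm_num)
    rw [h1, h2]
    simp only [List.foldl_cons, List.foldl_nil]
    rw [stepA_spec l mi 0 hm (hval 1 (by omega) (by omega))]
    refine ⟨by simp [hlen], ?_⟩
    intro k hk
    rcases Nat.eq_zero_or_pos k with hk0 | hk0
    · subst hk0
      rw [getD_set_self _ _ _ (by omega)]
    · rw [getD_set_ne _ _ _ _ (by omega)]
      exact hval k (by omega) hk
  | succ m ih =>
    intro mi hm hlen hval
    have h1 : PySem.List.pyRange ((m + 1 : Nat) : Int) (-1) (-1) =
        ((m + 1 : Nat) : Int) :: PySem.List.pyRange (((m + 1 : Nat) : Int) - 1) (-1) (-1) :=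
      PySem.List.pyRange_neg_one_cons (by push_cast; omega)
    have h2 : (((m + 1 : Nat) : Int) - 1) = ((m : Nat) : Int) := by push_cast; ring
    rw [h1, h2]
    simp only [List.foldl_cons]
    rw [stepA_spec l mi (m + 1) (by omega) (hval (m + 2) (by omega) (by omega))]
    refine ih _ (by omega) (by simp [hlen]) ?_
    intro k hk hk2
    rcases Nat.eq_or_lt_of_le hk with hk1 | hk1
    · subst hk1
      rw [getD_set_self _ _ _ (by omega)]
    · rw [getD_set_ne _ _ _ _ (by omega)]
      exact hval k (by omega) hk2

lemma miBuilt_spec (l : List Char) (hl : l ≠ []) :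
    ∀ k : Nat, k < l.length → (miBuilt l).getD k 0 = (k : Int) + rmaxIdx (l.drop k) := by
  have hn : 1 ≤ l.length := List.length_pos_iff.mpr hl
  have e1 : ((l.length : Int) - 1) = ((l.length - 1 : Nat) : Int) := by omega
  have e0 : ((l.length : Int)).toNat = l.length := by omega
  have hmi0 : PySem.List.pySetD (List.replicate ((l.length : Int)).toNat 0)
      ((l.length : Int) - 1) ((l.length : Int) - 1) =
      (List.replicate l.length (0 : Int)).set (l.length - 1) ((l.length : Int) - 1) := by
    rw [e0, e1, PySem.List.pySetD_natCast]
  have hlen0 : ((List.replicate l.length (0 : Int)).set (l.length - 1)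
      ((l.length : Int) - 1)).length = l.length := by simp
  have hlast : ((List.replicate l.length (0 : Int)).set (l.length - 1)
      ((l.length : Int) - 1)).getD (l.length - 1) 0 = (l.length : Int) - 1 := by
    rw [getD_set_self _ _ _ (by simp; omega)]
  have hrlast : rmaxIdx (l.drop (l.length - 1)) = 0 :=
    rmaxIdx_len_one _ (by simp [List.length_drop]; omega)
  by_cases h1 : l.length = 1
  · intro k hk
    have hk0 : k = 0 := by omega
    subst hk0
    unfold miBuilt
    rw [hmi0]
    have e3 : ((l.length : Int) - 2) = -1 := by omega
    rw [e3, PySem.List.pyRange_neg_one_eq_nil (by norm_num), List.foldl_nil]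
    have e4 : l.length - 1 = 0 := by omega
    rw [e4] at hlast
    rw [e4, hlast]
    rw [rmaxIdx_len_one _ (by simpa using h1)]
    omega
  · have h2 : 2 ≤ l.length := by omega
    have e2 : ((l.length : Int) - 2) = ((l.length - 2 : Nat) : Int) := by omega
    unfold miBuilt
    rw [hmi0, e2]
    intro k hk
    refine (foldA_spec l (l.length - 2) _ (by omega) hlen0 ?_).2 k hk
    intro k' hk' hk'2
    have : k' = l.length - 1 := by omega
    subst this
    rw [hlast, hrlast, e1]
    simp
lemma loop2_spec (l : List Char) (mi : List Int)
    (hmi : ∀ k : Nat, k < l.length → mi.getD k 0 = (k : Int) + rmaxIdx (l.drop k)) :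
    ∀ (fuel k : Nat), k + fuel = l.length →
    largestSwapLoop2 l mi (PySem.List.pyRange (k : Int) (l.length : Int) 1) = specRes l k := by
  intro fuel
  induction fuel with
  | zero =>
    intro k hk
    have : k = l.length := by omega
    subst this
    rw [PySem.List.pyRange_one_eq_nil (le_refl _)]
    unfold specRes
    simp [largestSwapLoop2, List.drop_length, pairAux]
  | succ fuel ih =>
    intro k hk
    have hklen : k < l.length := by omega
    have hdk : l.drop k = l[k] :: l.drop (k + 1) := List.drop_eq_getElem_cons hklen
    have ht' : l.drop (k + 1) = [] ∨ l.drop (k + 1) ≠ [] := em _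
    rw [PySem.List.pyRange_one_cons (by exact_mod_cast hklen)]
    simp only [largestSwapLoop2]
    have ej : PySem.List.pyGetD mi (k : Int) 0 =
        ((k + rmaxIdx (l.drop k) : Nat) : Int) := by
      rw [PySem.List.pyGetD_natCast, hmi k hklen]; push_cast; ring
    have ea : PySem.List.pyGetD l (k : Int) ' ' = l[k] := by
      rw [PySem.List.pyGetD_natCast]; exact List.getD_eq_getElem l ' ' hklen
    have em' : PySem.List.pyGetD l ((k + rmaxIdx (l.drop k) : Nat) : Int) ' ' =
        mval (l.drop k) := by
      rw [PySem.List.pyGetD_natCast, ← getD_drop]; rfl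
    rw [ej, ea, em']
    have hrec : ((k : Int) + 1) = ((k + 1 : Nat) : Int) := by push_cast; ring
    by_cases hc : l[k] < mval (l.drop k)
    · rw [if_pos hc]
      -- the swap branch
      have ht : l.drop (k + 1) ≠ [] := by
        intro h0
        rw [hdk, h0] at hc
        simp [mval, rmaxIdx] at hc
      have hng : ¬ l[k] > mval (l.drop (k + 1)) := by
        intro hgt
        rw [hdk, mval_cons _ _ ht, if_pos hgt] at hc
        exact lt_irrefl _ hc
      have hlt : l[k] < mval (l.drop (k + 1)) := by
        rw [hdk, mval_cons _ _ ht, if_neg hng] at hc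
        exact hc
      have hr : rmaxIdx (l.drop k) = rmaxIdx (l.drop (k + 1)) + 1 := by
        rw [hdk, rmaxIdx_cons _ _ ht,
          if_neg (show ¬ l[k] > (l.drop (k + 1)).getD (rmaxIdx (l.drop (k + 1))) ' ' from hng)]
      have hp : pairAux (l.drop k) = some (0, rmaxIdx (l.drop (k + 1)) + 1) := by
        rw [hdk, pairAux_cons _ _ ht,
          if_pos (show l[k] < (l.drop (k + 1)).getD (rmaxIdx (l.drop (k + 1))) ' ' from hlt)]
      have hsw : specRes l k = swapD l (k + 0) (k + (rmaxIdx (l.drop (k + 1)) + 1)) := by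
        unfold specRes; rw [hp]
      rw [hsw, ← hr]
      simp only [Nat.add_zero]
      unfold swapD
      rw [PySem.List.pySetD_natCast, PySem.List.pySetD_natCast]
      have h2 : mval (l.drop k) = l.getD (k + rmaxIdx (l.drop k)) ' ' := by
        unfold mval; rw [getD_drop]
      have h3 : l.getD k ' ' = l[k] := List.getD_eq_getElem l ' ' hklen
      rw [h2, h3]
    · rw [if_neg hc]
      rw [hrec, ih (k + 1) (by omega)]
      -- specRes l (k+1) = specRes l k in the no-swap case
      rcases ht' with ht | ht
      · unfold specRes
        rw [hdk, ht]
        simp [pairAux]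
      · have hnc : ¬ l[k] < mval (l.drop (k + 1)) := by
          intro hlt
          apply hc
          rw [hdk, mval_cons _ _ ht]
          split_ifs with hgt
          · exact absurd hlt (not_lt_of_gt hgt)
          · exact hlt
        have hp : pairAux (l.drop k) =
            (pairAux (l.drop (k + 1))).map (fun p => (p.1 + 1, p.2 + 1)) := by
          rw [hdk, pairAux_cons _ _ ht,
            if_neg (show ¬ l[k] < (l.drop (k + 1)).getD (rmaxIdx (l.drop (k + 1))) ' ' from hnc)]
        unfold specRes
        rw [hp]
        cases hq : pairAux (l.drop (k + 1)) with
        | none => simp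
        | some q =>
          simp only [Option.map_some]
          have e1 : k + (q.1 + 1) = k + 1 + q.1 := by omega
          have e2 : k + (q.2 + 1) = k + 1 + q.2 := by omega
          rw [e1, e2]

lemma stepB_spec (l : List Char) (m : Nat) (hm : m + 2 ≤ l.length) :
    stepB l (stateOf l (m + 1)) (m : Int) = stateOf l m := by
  have hm0 : m < l.length := by omega
  have ht : l.drop (m + 1) ≠ [] := drop_ne_nil l (m + 1) (by omega)
  have hdm : l.drop m = l[m] :: l.drop (m + 1) := List.drop_eq_getElem_cons hm0
  have ea : PySem.List.pyGetD l (m : Int) ' ' = l[m] := by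
    rw [PySem.List.pyGetD_natCast]; exact List.getD_eq_getElem l ' ' hm0
  have hmv : mval (l.drop m) =
      if l[m] > mval (l.drop (m + 1)) then l[m] else mval (l.drop (m + 1)) := by
    rw [hdm]; exact mval_cons _ _ ht
  have hri : rmaxIdx (l.drop m) =
      if l[m] > mval (l.drop (m + 1)) then 0 else rmaxIdx (l.drop (m + 1)) + 1 := by
    rw [hdm]; exact rmaxIdx_cons _ _ ht
  have hpx : pairAux (l.drop m) =
      if l[m] < mval (l.drop (m + 1)) then some (0, rmaxIdx (l.drop (m + 1)) + 1)
      else (pairAux (l.drop (m + 1))).map (fun p => (p.1 + 1, p.2 + 1)) := by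
    rw [hdm]; exact pairAux_cons _ _ ht
  unfold stepB stateOf
  simp only [ea, hmv, hri, hpx]
  by_cases h1 : l[m] > mval (l.drop (m + 1))
  · have hnc : ¬ l[m] < mval (l.drop (m + 1)) := not_lt_of_gt h1
    rw [if_pos h1, if_pos h1, if_pos h1, if_neg hnc]
    rw [Prod.mk.injEq, Prod.mk.injEq, Prod.mk.injEq]
    refine ⟨rfl, by push_cast; ring, ?_, ?_⟩
    · rw [encI_shift]
    · rw [encJ_shift]
  · rw [if_neg h1, if_neg h1, if_neg h1]
    by_cases h2 : l[m] < mval (l.drop (m + 1))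
    · rw [if_pos h2, if_pos h2]
      rw [Prod.mk.injEq, Prod.mk.injEq, Prod.mk.injEq]
      refine ⟨rfl, by push_cast; ring, ?_, ?_⟩
      · simp only [encI]; push_cast; ring
      · simp only [encJ]; push_cast; ring
    · rw [if_neg h2, if_neg h2]
      rw [Prod.mk.injEq, Prod.mk.injEq, Prod.mk.injEq]
      refine ⟨rfl, by push_cast; ring, ?_, ?_⟩
      · rw [encI_shift]
      · rw [encJ_shift]

lemma foldB_spec (l : List Char) : ∀ (m : Nat), m + 2 ≤ l.length →
    (PySem.List.pyRange (m : Int) (-1) (-1)).foldl (stepB l) (stateOf l (m + 1)) =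
      stateOf l 0 := by
  intro m
  induction m with
  | zero =>
    intro hm
    have h1 : PySem.List.pyRange ((0 : Nat) : Int) (-1) (-1) =
        ((0 : Nat) : Int) :: PySem.List.pyRange (((0 : Nat) : Int) - 1) (-1) (-1) :=
      PySem.List.pyRange_neg_one_cons (by norm_num)
    have h2 : PySem.List.pyRange (((0 : Nat) : Int) - 1) (-1) (-1) = [] :=
      PySem.List.pyRange_neg_one_eq_nil (by norm_num)
    rw [h1, h2]
    simp only [List.foldl_cons, List.foldl_nil]
    exact stepB_spec l 0 hm
  | succ m ih =>
    intro hm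
    have h1 : PySem.List.pyRange ((m + 1 : Nat) : Int) (-1) (-1) =
        ((m + 1 : Nat) : Int) :: PySem.List.pyRange (((m + 1 : Nat) : Int) - 1) (-1) (-1) :=
      PySem.List.pyRange_neg_one_cons (by push_cast; omega)
    have h2 : (((m + 1 : Nat) : Int) - 1) = ((m : Nat) : Int) := by push_cast; ring
    rw [h1, h2]
    simp only [List.foldl_cons]
    rw [stepB_spec l (m + 1) (by omega)]
    exact ih (by omega)

lemma initB_spec (l : List Char) (hl : l ≠ []) :
    (PySem.List.pyGetD l ((l.length : Int) - 1) ' ', (l.length : Int) - 1,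
      (-1 : Int), (-1 : Int)) = stateOf l (l.length - 1) := by
  have hn : 1 ≤ l.length := List.length_pos_iff.mpr hl
  have e1 : ((l.length : Int) - 1) = ((l.length - 1 : Nat) : Int) := by omega
  have hr : rmaxIdx (l.drop (l.length - 1)) = 0 :=
    rmaxIdx_len_one _ (by simp [List.length_drop]; omega)
  have hp : pairAux (l.drop (l.length - 1)) = none :=
    pairAux_len_one _ (by simp [List.length_drop]; omega)
  unfold stateOf
  rw [hp, hr]
  rw [Prod.mk.injEq, Prod.mk.injEq, Prod.mk.injEq]
  refine ⟨?_, by simp [e1], rfl, rfl⟩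
  rw [e1, PySem.List.pyGetD_natCast]
  unfold mval
  rw [hr, getD_drop]
  simp

lemma specRes_zero_none (l : List Char) (hp : pairAux l = none) : specRes l 0 = l := by
  unfold specRes; rw [List.drop_zero, hp]

lemma specRes_zero_some (l : List Char) (i j : Nat) (hp : pairAux l = some (i, j)) :
    specRes l 0 = swapD l i j := by
  unfold specRes
  rw [List.drop_zero, hp]
  show swapD l (0 + i) (0 + j) = swapD l i j
  simp

-- ===== VERDICT (by name: the statement is the Claim_ definition above) =====
theorem largestSwap_spec : Claim_equal_largestSwap := by
  intro s _ hpre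
  unfold Spec_largestSwap
  have hl : s.toList ≠ [] := hpre
  have hn : 1 ≤ s.toList.length := List.length_pos_iff.mpr hl
  have hA : largestSwap s = String.ofList
      (largestSwapLoop2 s.toList (miBuilt s.toList)
        (PySem.List.pyRange (((0 : Nat) : Int)) ((s.toList.length : Int)) 1)) := rfl
  rw [hA, loop2_spec s.toList (miBuilt s.toList) (miBuilt_spec s.toList hl)
    s.toList.length 0 (by omega)]
  have hB : largestSwap_alt s =
      match (PySem.List.pyRange ((s.toList.length : Int) - 2) (-1) (-1)).foldl
          (stepB s.toList)
          (PySem.List.pyGetD s.toList ((s.toList.length : Int) - 1) ' ',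
            (s.toList.length : Int) - 1, -1, -1) with
      | (_, _, bestI, bestJ) =>
        if bestI = -1 then s
        else
          String.ofList (PySem.List.pySetD
            (PySem.List.pySetD s.toList bestI (PySem.List.pyGetD s.toList bestJ ' ')) bestJ
            (PySem.List.pyGetD s.toList bestI ' ')) := by
    unfold largestSwap_alt
    rw [if_neg hl]
    rfl
  have hst : (PySem.List.pyRange ((s.toList.length : Int) - 2) (-1) (-1)).foldl
      (stepB s.toList)
      (PySem.List.pyGetD s.toList ((s.toList.length : Int) - 1) ' ',
        (s.toList.length : Int) - 1, -1, -1) = stateOf s.toList 0 := by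
    rw [initB_spec s.toList hl]
    by_cases h1 : s.toList.length = 1
    · have e : ((s.toList.length : Int) - 2) = -1 := by omega
      rw [e, PySem.List.pyRange_neg_one_eq_nil (by norm_num), List.foldl_nil, h1]
    · have h2 : 2 ≤ s.toList.length := by omega
      have e : ((s.toList.length : Int) - 2) = ((s.toList.length - 2 : Nat) : Int) := by omega
      have e2 : s.toList.length - 1 = (s.toList.length - 2) + 1 := by omega
      rw [e, e2]
      exact foldB_spec s.toList (s.toList.length - 2) (by omega)
  rw [hB, hst]
  unfold stateOf
  simp only [List.drop_zero]
  cases hp : pairAux s.toList with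
  | none =>
    rw [specRes_zero_none _ hp]
    simp only [encI, encJ]
    simp [String.ofList_toList]
  | some q =>
    obtain ⟨i, j⟩ := q
    rw [specRes_zero_some _ i j hp]
    simp only [encI, encJ]
    rw [if_neg (by push_cast; omega)]
    simp only [Nat.cast_zero, zero_add]
    congr 1
    simp [swapD]
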